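-- pv_equiv track=rewrite | github.com/Dantos7/advent-of-code-2024-solutions | src/aoc/05.py | get_valid_updates
-- ===== SOURCE A (Python) =====
-- def get_valid_updates(updates: list[list[str]], rules: dict) -> list[int]:
--     """Get valid updates."""
--     valid_updates = []
--     for i, line in enumerate(updates):
--         is_update_valid = True
--         max_j = len(line) - 1
--         for j in range(max_j + 1):
--             number_analyzed = line[max_j - j]
--             for z in range(max_j - j):
--                 if number_analyzed in rules and line[z] in rules[number_analyzed]:
--                     is_update_valid = False
--                     break
--             if not is_update_valid:
--                 break
--
--         if is_update_valid:
--             valid_updates.append(i)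
--
--     return valid_updates
-- ===== SOURCE B (Python) =====
-- def get_valid_updates(updates: list[list[str]], rules: dict) -> list[int]:
--     """Get valid updates."""
--     def line_ok(line):
--         seen = set()
--         for x in line:
--             succ = rules.get(x)
--             if succ is not None and not seen.isdisjoint(succ):
--                 return False
--             seen.add(x)
--         return True
--
--     return [i for i, line in enumerate(updates) if line_ok(line)]
-- ===== Notes on version B (the rewrite author's own statement) =====
-- stated objective: faster
-- what changed: Replaces A's backward position loop with a nested scan over all earlier positions (quadratic in line length with a rules lookup and list-membership test per pair) by a single forward pass per line keeping a set of values seen so far and testing the rule-successor list against it, with the index list built by a comprehension over a helper predicate.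
import Mathlib
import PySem

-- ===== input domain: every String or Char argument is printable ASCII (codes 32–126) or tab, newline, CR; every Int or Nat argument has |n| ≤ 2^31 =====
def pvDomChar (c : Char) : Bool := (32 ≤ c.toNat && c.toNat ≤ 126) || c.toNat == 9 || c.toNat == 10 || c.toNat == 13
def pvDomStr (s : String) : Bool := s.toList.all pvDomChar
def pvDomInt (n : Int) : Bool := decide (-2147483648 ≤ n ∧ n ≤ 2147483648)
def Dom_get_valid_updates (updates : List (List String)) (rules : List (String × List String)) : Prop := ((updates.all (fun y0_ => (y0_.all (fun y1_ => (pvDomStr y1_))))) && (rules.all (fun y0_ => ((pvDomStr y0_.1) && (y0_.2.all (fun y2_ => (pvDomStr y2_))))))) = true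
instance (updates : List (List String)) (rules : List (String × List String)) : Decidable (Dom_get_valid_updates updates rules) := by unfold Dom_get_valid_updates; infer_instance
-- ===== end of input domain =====

-- B replaces A's per-position backward scan over all earlier positions by one forward
-- pass per line with a seen-set tested against the rule-successor list (objective: faster).

-- ===== PORT A =====
-- inner z-loop: scans the elements before the analyzed position, breaking at the first violation
def pvA_inner (rules : List (String × List String)) (num : String) : List String → Bool
  | [] => true
  | y :: rest =>
    if (PySem.Dict.get? ⟨rules⟩ num).isSome && ((PySem.Dict.get? ⟨rules⟩ num).getD []).contains y then
      false
    else pvA_inner rules num rest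

-- outer j-loop: j = 0..max_j analyzes position max_j - j; fuel k is the number of positions left,
-- so the call with k = line.length starts at position max_j = length - 1, exactly as range(max_j + 1)
def pvA_outer (rules : List (String × List String)) (line : List String) : Nat → Bool
  | 0 => true
  | k + 1 =>
    if pvA_inner rules ((PySem.List.pyGet? line (k : Int)).getD "") (line.take k) then
      pvA_outer rules line k
    else false

def get_valid_updates (updates : List (List String)) (rules : List (String × List String)) : List Int :=
  (PySem.List.enumerate updates).foldl
    (fun acc p => if pvA_outer rules p.2 p.2.length then acc ++ [p.1] else acc) []

-- ===== PORT B =====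
-- forward pass with a running seen-set; returns False at the first rule-successor already seen
def pvB_line (rules : List (String × List String)) (seen : PySem.Set String) : List String → Bool
  | [] => true
  | x :: rest =>
    if (PySem.Dict.get? ⟨rules⟩ x).isSome
        && !(PySem.Set.isdisjoint seen ((PySem.Dict.get? ⟨rules⟩ x).getD [])) then false
    else pvB_line rules (PySem.Set.add seen x) rest

def get_valid_updates_alt (updates : List (List String)) (rules : List (String × List String)) : List Int :=
  (PySem.List.enumerate updates).filterMap
    (fun p => if pvB_line rules PySem.Set.empty p.2 then some p.1 else none)

-- ===== PRECONDITION & SPEC =====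
def Spec_get_valid_updates (updates : List (List String)) (rules : List (String × List String)) (out : List Int) : Prop := out = get_valid_updates_alt updates rules
instance (updates : List (List String)) (rules : List (String × List String)) (out : List Int) : Decidable (Spec_get_valid_updates updates rules out) := by unfold Spec_get_valid_updates; infer_instance

-- ===== CLAIM (what is proved, stated in full; the proofs are below) =====
def Claim_equal_get_valid_updates : Prop := ∀ (updates : List (List String)) (rules : List (String × List String)), Dom_get_valid_updates updates rules → Spec_get_valid_updates updates rules (get_valid_updates updates rules)

-- ===== LEMMAS AND PROOFS =====

-- y violates against num: y is in num's successor list (empty if num has no rule)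
def pvViol (rules : List (String × List String)) (num y : String) : Bool :=
  ((PySem.Dict.get? ⟨rules⟩ num).getD []).contains y

theorem pvA_inner_eq (rules : List (String × List String)) (num : String) (pre : List String) :
    pvA_inner rules num pre = !(pre.any (pvViol rules num)) := by
  induction pre with
  | nil => rfl
  | cons y rest ih =>
    unfold pvA_inner
    cases h : PySem.Dict.get? ⟨rules⟩ num with
    | none => simp [pvViol, h, ih]
    | some l => simp [pvViol, h, ih]

theorem pvA_outer_iff (rules : List (String × List String)) (line : List String) (k : Nat) :
    pvA_outer rules line k = true ↔
      ∀ p < k, (line.take p).any (pvViol rules (line.getD p "")) = false := by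
  induction k with
  | zero => simp [pvA_outer]
  | succ k ih =>
    unfold pvA_outer
    rw [pvA_inner_eq]
    have hnum : ((PySem.List.pyGet? line (k : Int)).getD "") = line.getD k "" := by
      simp [PySem.List.pyGet?_natCast, List.getD]
    rw [hnum]
    by_cases hk : (line.take k).any (pvViol rules (line.getD k "")) = false
    · simp only [hk, Bool.not_false, if_true, ih]
      constructor
      · intro h p hp
        rcases Nat.lt_succ_iff_lt_or_eq.mp hp with h' | h'
        · exact h p h'
        · subst h'; exact hk
      · intro h p hp; exact h p (Nat.lt_succ_of_lt hp)
    · simp only [Bool.not_eq_false] at hk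
      simp only [hk, Bool.not_true]
      constructor
      · intro h; cases h
      · intro h
        have := h k (Nat.lt_succ_self k)
        rw [this] at hk; cases hk

theorem pvB_line_iff (rules : List (String × List String)) :
    ∀ (line : List String) (seen : PySem.Set String) (pre : List String),
      (∀ s, s ∈ seen ↔ s ∈ pre) →
      (pvB_line rules seen line = true ↔
        ∀ p < line.length, (pre ++ line.take p).any (pvViol rules (line.getD p "")) = false) := by
  intro line
  induction line with
  | nil => intro seen pre _; simp [pvB_line]
  | cons x rest ih =>
    intro seen pre hmem
    unfold pvB_line
    have hcond : ((PySem.Dict.get? ⟨rules⟩ x).isSome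
          && !(PySem.Set.isdisjoint seen ((PySem.Dict.get? ⟨rules⟩ x).getD [])))
        = pre.any (pvViol rules x) := by
      cases h : PySem.Dict.get? ⟨rules⟩ x with
      | none => simp [pvViol, h]
      | some l =>
        simp only [Option.isSome_some, Bool.true_and, Option.getD_some]
        rw [Bool.eq_iff_iff]
        simp only [Bool.not_eq_true']
        rw [← Bool.not_eq_true, PySem.Set.isdisjoint_iff]
        push Not
        simp only [List.any_eq_true, pvViol, h, Option.getD_some, List.contains_eq_mem,
          decide_eq_true_eq]
        constructor
        · rintro ⟨s, hs, hsl⟩; exact ⟨s, (hmem s).mp hs, hsl⟩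
        · rintro ⟨s, hs, hsl⟩; exact ⟨s, (hmem s).mpr hs, hsl⟩
    rw [hcond]
    by_cases hx : pre.any (pvViol rules x) = true
    · simp only [hx, if_true]
      constructor
      · intro h; cases h
      · intro h
        have h0 := h 0 (Nat.succ_pos _)
        simp only [List.take_zero, List.append_nil, List.getD] at h0
        simp only [List.getElem?_cons_zero, Option.getD_some] at h0
        rw [h0] at hx; cases hx
    · simp only [Bool.not_eq_true] at hx
      simp only [hx, Bool.false_eq_true, if_false]
      have hmem' : ∀ s, s ∈ PySem.Set.add seen x ↔ s ∈ pre ++ [x] := by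
        intro s
        rw [PySem.Set.mem_add]
        simp [hmem s, or_comm]
      rw [ih (PySem.Set.add seen x) (pre ++ [x]) hmem']
      constructor
      · intro h p hp
        cases p with
        | zero =>
          simp [List.getD, hx]
        | succ q =>
          have := h q (Nat.lt_of_succ_lt_succ hp)
          simpa [List.append_assoc, List.getD] using this
      · intro h p hp
        have := h (p + 1) (Nat.succ_lt_succ hp)
        simpa [List.append_assoc, List.getD] using this

theorem pv_line_eq (rules : List (String × List String)) (line : List String) :
    pvA_outer rules line line.length = pvB_line rules PySem.Set.empty line := by
  rw [Bool.eq_iff_iff, pvA_outer_iff,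
    pvB_line_iff rules line PySem.Set.empty [] (by intro s; simp [PySem.Set.empty])]
  simp

theorem pv_filterMap_if (l : List (Int × List String)) (q : List String → Bool) :
    l.filterMap (fun p => if q p.2 then some p.1 else none)
      = (l.filter (fun p => q p.2)).map (fun p => p.1) := by
  induction l with
  | nil => rfl
  | cons a l ih =>
    by_cases h : q a.2 = true
    · simp [h, ih]
    · simp [h, ih]

-- ===== VERDICT (by name: the statement is the Claim_ definition above) =====
theorem get_valid_updates_spec : Claim_equal_get_valid_updates := by
  intro updates rules _
  unfold Spec_get_valid_updates get_valid_updates get_valid_updates_alt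
  rw [PySem.List.foldl_append_if, pv_filterMap_if, List.nil_append]
  congr 1
  apply List.filter_congr
  intro p _
  exact pv_line_eq rules p.2
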